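-- pv_equiv track=rewrite | github.com/AidanNowa/EC551_Lab1 | program1.py | convert_minterms_to_binary
-- ===== SOURCE A (Python) =====
-- def convert_minterms_to_binary(minterms):
--     binary_minterms = []
--     for minterm in minterms:
--         minterm = minterm.replace('~A', '0')
--         minterm = minterm.replace('~B', '0')
--         minterm = minterm.replace('~C', '0')
--         minterm = minterm.replace('~D', '0')
--         minterm = minterm.replace('A', '1')
--         minterm = minterm.replace('B', '1')
--         minterm = minterm.replace('C', '1')
--         minterm = minterm.replace('D', '1')
--         minterm = minterm.replace('(', '')
--         minterm = minterm.replace(')', '')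
--         minterm = minterm.replace('&', '')
--         minterm = minterm.replace('|', '')
--         minterm = minterm.replace('+', '')
--         minterm = minterm.replace('*', '')
--         minterm = minterm.replace(' ', '')
--
--         binary_minterms.append(minterm)
--
--     return binary_minterms
-- ===== SOURCE B (Python) =====
-- def convert_minterms_to_binary(minterms):
--     out = []
--     for m in minterms:
--         res = []
--         i = 0
--         n = len(m)
--         while i < n:
--             c = m[i]
--             if c == '~' and i + 1 < n and m[i + 1] in 'ABCD':
--                 res.append('0')
--                 i += 2
--             elif c in 'ABCD':
--                 res.append('1')
--                 i += 1
--             elif c in '()&|+* ':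
--                 i += 1
--             else:
--                 res.append(c)
--                 i += 1
--         out.append(''.join(res))
--     return out
-- ===== Notes on version B (the rewrite author's own statement) =====
-- stated objective: alternative
-- what changed: A makes fifteen sequential str.replace passes over each minterm string; B makes one left-to-right scan per string, emitting '0' for '~'+letter, '1' for a bare letter, dropping '()&|+* ' and copying everything else (a lone '~' included).
import Mathlib
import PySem

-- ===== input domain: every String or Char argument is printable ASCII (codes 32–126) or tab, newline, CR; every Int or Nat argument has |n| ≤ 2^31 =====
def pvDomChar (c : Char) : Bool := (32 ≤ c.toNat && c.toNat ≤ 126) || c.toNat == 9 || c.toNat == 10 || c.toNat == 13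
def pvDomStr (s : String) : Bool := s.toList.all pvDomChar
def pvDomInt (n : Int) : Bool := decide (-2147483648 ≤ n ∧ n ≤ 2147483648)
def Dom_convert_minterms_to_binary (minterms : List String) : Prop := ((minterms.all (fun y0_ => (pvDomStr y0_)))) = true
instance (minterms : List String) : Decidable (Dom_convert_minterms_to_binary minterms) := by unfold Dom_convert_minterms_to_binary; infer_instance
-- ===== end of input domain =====

-- B replaces A's fifteen sequential str.replace passes over each minterm by one
-- left-to-right scan per string (objective: alternative single-pass decomposition).

-- ===== PORT A =====
-- literal port of A: for each minterm, the chain of fifteen str.replace calls, appended in order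
def convert_minterms_to_binary (minterms : List String) : List String :=
  minterms.foldl (fun binary_minterms minterm =>
    binary_minterms ++
      [PySem.Str.replace (PySem.Str.replace (PySem.Str.replace (PySem.Str.replace
       (PySem.Str.replace (PySem.Str.replace (PySem.Str.replace (PySem.Str.replace
       (PySem.Str.replace (PySem.Str.replace (PySem.Str.replace (PySem.Str.replace
       (PySem.Str.replace (PySem.Str.replace (PySem.Str.replace minterm
         "~A" "0") "~B" "0") "~C" "0") "~D" "0")
         "A" "1") "B" "1") "C" "1") "D" "1")
         "(" "") ")" "") "&" "") "|" "") "+" "") "*" "") " " ""]) []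

-- ===== PORT B =====
-- B's scan: one pass over the characters; '~'+letter → '0', letter → '1',
-- symbols/space dropped, anything else copied (a lone '~' included)
def scanChars : List Char → List Char
  | [] => []
  | '~' :: x :: t =>
      if x ∈ (['A', 'B', 'C', 'D'] : List Char) then '0' :: scanChars t
      else '~' :: scanChars (x :: t)
  | c :: t =>
      if c ∈ (['A', 'B', 'C', 'D'] : List Char) then '1' :: scanChars t
      else if c ∈ (['(', ')', '&', '|', '+', '*', ' '] : List Char) then scanChars t
      else c :: scanChars t

def convert_minterms_to_binary_alt (minterms : List String) : List String :=
  minterms.map (fun minterm => String.ofList (scanChars minterm.toList))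

-- ===== PRECONDITION & SPEC =====
def Spec_convert_minterms_to_binary (minterms : List String) (out : List String) : Prop := out = convert_minterms_to_binary_alt minterms
instance (minterms : List String) (out : List String) : Decidable (Spec_convert_minterms_to_binary minterms out) := by unfold Spec_convert_minterms_to_binary; infer_instance

-- ===== CLAIM (what is proved, stated in full; the proofs are below) =====
def Claim_equal_convert_minterms_to_binary : Prop := ∀ (minterms : List String), Dom_convert_minterms_to_binary minterms → Spec_convert_minterms_to_binary minterms (convert_minterms_to_binary minterms)

-- ===== LEMMAS AND PROOFS =====

-- fuel-free reformulation of PySem.Chars.replace for a nonempty pattern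
def rep (o : Char) (os : List Char) (nw : List Char) : List Char → List Char
  | [] => []
  | c :: t =>
      if (o :: os).isPrefixOf (c :: t) then nw ++ rep o os nw (t.drop os.length)
      else c :: rep o os nw t
  termination_by l => l.length
  decreasing_by
  · simp only [List.length_drop, List.length_cons]; omega
  · simp only [List.length_cons]; omega

theorem go_eq_rep (o : Char) (os nw : List Char) :
    ∀ fuel l acc, l.length ≤ fuel →
      PySem.Chars.replace.go (o :: os) nw fuel l acc = acc.reverse ++ rep o os nw l := by
  intro fuel
  induction fuel with
  | zero =>
    intro l acc h
    have : l = [] := by cases l <;> simp_all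
    subst this; simp [PySem.Chars.replace.go, rep]
  | succ n ih =>
    intro l acc h
    cases l with
    | nil => simp [PySem.Chars.replace.go, rep]
    | cons c t =>
      rw [PySem.Chars.replace.go]
      simp only [rep]
      by_cases hp : (o :: os).isPrefixOf (c :: t) = true
      · simp only [hp, if_true]
        simp only [List.length_cons, List.drop_succ_cons]
        rw [ih]
        · simp
        · simp only [List.length_drop]
          simp at h; omega
      · simp only [hp, if_false, Bool.false_eq_true]
        rw [ih]
        · simp
        · simp at h; omega

theorem replace_eq_rep (s : List Char) (o : Char) (os nw : List Char) :
    PySem.Chars.replace s (o :: os) nw = rep o os nw s := by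
  rw [PySem.Chars.replace]
  simp [go_eq_rep o os nw s.length s [] (le_refl _)]

-- the full chain of A's fifteen replaces, on the character level
def chainR (cs : List Char) : List Char :=
  rep ' ' [] [] (rep '*' [] [] (rep '+' [] [] (rep '|' [] [] (rep '&' [] []
    (rep ')' [] [] (rep '(' [] [] (rep 'D' [] ['1'] (rep 'C' [] ['1']
    (rep 'B' [] ['1'] (rep 'A' [] ['1'] (rep '~' ['D'] ['0'] (rep '~' ['C'] ['0']
    (rep '~' ['B'] ['0'] (rep '~' ['A'] ['0'] cs))))))))))))))

theorem rep_cons_ne (o : Char) (os nw : List Char) (c : Char) (t : List Char) (h : ¬ c = o) :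
    rep o os nw (c :: t) = c :: rep o os nw t := by
  rw [rep]
  have : (o :: os).isPrefixOf (c :: t) = false := by
    simp [List.isPrefixOf]; intro hoc; exact absurd hoc.symm h
  simp [this]

theorem rep2_skip (X : Char) (v : List Char) (h : v.head? ≠ some X) :
    rep '~' [X] ['0'] ('~' :: v) = '~' :: rep '~' [X] ['0'] v := by
  cases v with
  | nil => simp [rep]
  | cons y t =>
    have hy : ¬ y = X := by simpa using h
    rw [rep]
    have : (['~', X]).isPrefixOf ('~' :: y :: t) = false := by
      simp [List.isPrefixOf]; intro hxy; exact absurd hxy.symm hy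
    simp [this]

theorem head?_rep0 (o : Char) (os : List Char) (v : List Char) :
    (rep o os ['0'] v).head? = v.head? ∨ (rep o os ['0'] v).head? = some '0' := by
  cases v with
  | nil => left; simp [rep]
  | cons c t =>
    rw [rep]
    split_ifs with hp
    · right; simp
    · left; simp

theorem chain_eq_scan : ∀ cs : List Char, chainR cs = scanChars cs := by
  intro cs
  induction cs using scanChars.induct with
  | case1 => simp [chainR, rep, scanChars]
  | case2 x t hx ih =>
    simp only [chainR] at ih
    simp only [List.mem_cons, List.not_mem_nil, or_false] at hx
    rcases hx with rfl | rfl | rfl | rfl <;> simp [chainR, rep, scanChars, ih]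
  | case3 x t hx ih =>
    -- '~' followed by a non-letter: the '~' passes through every replace
    have hxA : ¬ x = 'A' := by simp at hx; tauto
    have hxB : ¬ x = 'B' := by simp at hx; tauto
    have hxC : ¬ x = 'C' := by simp at hx; tauto
    have hxD : ¬ x = 'D' := by simp at hx; tauto
    have h1 : ((rep '~' ['A'] ['0'] (x :: t)).head? = some x ∨
               (rep '~' ['A'] ['0'] (x :: t)).head? = some '0') := by
      simpa using head?_rep0 '~' ['A'] (x :: t)
    have h2 := head?_rep0 '~' ['B'] (rep '~' ['A'] ['0'] (x :: t))
    have h3 := head?_rep0 '~' ['C'] (rep '~' ['B'] ['0'] (rep '~' ['A'] ['0'] (x :: t)))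
    have hB : (rep '~' ['A'] ['0'] (x :: t)).head? ≠ some 'B' := by
      rcases h1 with h | h <;> rw [h] <;> simp [hxB]
    have hC : (rep '~' ['B'] ['0'] (rep '~' ['A'] ['0'] (x :: t))).head? ≠ some 'C' := by
      rcases h2 with h | h <;> rw [h]
      · rcases h1 with h' | h' <;> rw [h'] <;> simp [hxC]
      · simp
    have hD : (rep '~' ['C'] ['0'] (rep '~' ['B'] ['0'] (rep '~' ['A'] ['0'] (x :: t)))).head? ≠ some 'D' := by
      rcases h3 with h | h <;> rw [h]
      · rcases h2 with h' | h' <;> rw [h']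
        · rcases h1 with h'' | h'' <;> rw [h''] <;> simp [hxD]
        · simp
      · simp
    have step : chainR ('~' :: x :: t) = '~' :: chainR (x :: t) := by
      simp only [chainR]
      rw [rep2_skip 'A' (x :: t) (by simp [hxA]),
          rep2_skip 'B' _ hB, rep2_skip 'C' _ hC, rep2_skip 'D' _ hD,
          rep_cons_ne 'A' [] ['1'] '~' _ (by decide),
          rep_cons_ne 'B' [] ['1'] '~' _ (by decide),
          rep_cons_ne 'C' [] ['1'] '~' _ (by decide),
          rep_cons_ne 'D' [] ['1'] '~' _ (by decide),
          rep_cons_ne '(' [] [] '~' _ (by decide),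
          rep_cons_ne ')' [] [] '~' _ (by decide),
          rep_cons_ne '&' [] [] '~' _ (by decide),
          rep_cons_ne '|' [] [] '~' _ (by decide),
          rep_cons_ne '+' [] [] '~' _ (by decide),
          rep_cons_ne '*' [] [] '~' _ (by decide),
          rep_cons_ne ' ' [] [] '~' _ (by decide)]
    rw [step, ih]
    have hscan : scanChars ('~' :: x :: t) = '~' :: scanChars (x :: t) := by
      simp [scanChars, hx]
    rw [hscan]
  | case4 c t hshape hc ih =>
    simp only [chainR] at ih
    simp only [List.mem_cons, List.not_mem_nil, or_false] at hc
    rcases hc with rfl | rfl | rfl | rfl <;> simp [chainR, rep, scanChars, ih]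
  | case5 c t hshape hc1 hc2 ih =>
    simp only [chainR] at ih
    simp only [List.mem_cons, List.not_mem_nil, or_false] at hc2
    rcases hc2 with rfl | rfl | rfl | rfl | rfl | rfl | rfl <;>
      simp [chainR, rep, scanChars, ih]
  | case6 c t hshape hc1 hc2 ih =>
    by_cases hct : c = '~'
    · subst hct
      have ht : t = [] := by
        cases t with
        | nil => rfl
        | cons y u => exact absurd (hshape y u rfl rfl) (by simp)
      subst ht
      simp [chainR, rep, scanChars]
    · simp only [chainR] at ih
      have hA : ¬ c = 'A' := by simp at hc1; tauto
      have hB : ¬ c = 'B' := by simp at hc1; tauto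
      have hC : ¬ c = 'C' := by simp at hc1; tauto
      have hD : ¬ c = 'D' := by simp at hc1; tauto
      have p1 : ¬ c = '(' := by simp at hc2; tauto
      have p2 : ¬ c = ')' := by simp at hc2; tauto
      have p3 : ¬ c = '&' := by simp at hc2; tauto
      have p4 : ¬ c = '|' := by simp at hc2; tauto
      have p5 : ¬ c = '+' := by simp at hc2; tauto
      have p6 : ¬ c = '*' := by simp at hc2; tauto
      have p7 : ¬ c = ' ' := by simp at hc2; tauto
      simp only [chainR,
        rep_cons_ne '~' ['A'] ['0'] c _ hct, rep_cons_ne '~' ['B'] ['0'] c _ hct,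
        rep_cons_ne '~' ['C'] ['0'] c _ hct, rep_cons_ne '~' ['D'] ['0'] c _ hct,
        rep_cons_ne 'A' [] ['1'] c _ hA, rep_cons_ne 'B' [] ['1'] c _ hB,
        rep_cons_ne 'C' [] ['1'] c _ hC, rep_cons_ne 'D' [] ['1'] c _ hD,
        rep_cons_ne '(' [] [] c _ p1, rep_cons_ne ')' [] [] c _ p2,
        rep_cons_ne '&' [] [] c _ p3, rep_cons_ne '|' [] [] c _ p4,
        rep_cons_ne '+' [] [] c _ p5, rep_cons_ne '*' [] [] c _ p6,
        rep_cons_ne ' ' [] [] c _ p7]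
      rw [ih]
      simp [scanChars, hc1, hc2]

theorem per_string (m : String) :
    PySem.Str.replace (PySem.Str.replace (PySem.Str.replace (PySem.Str.replace
      (PySem.Str.replace (PySem.Str.replace (PySem.Str.replace (PySem.Str.replace
      (PySem.Str.replace (PySem.Str.replace (PySem.Str.replace (PySem.Str.replace
      (PySem.Str.replace (PySem.Str.replace (PySem.Str.replace m
        "~A" "0") "~B" "0") "~C" "0") "~D" "0")
        "A" "1") "B" "1") "C" "1") "D" "1")
        "(" "") ")" "") "&" "") "|" "") "+" "") "*" "") " " ""
      = String.ofList (scanChars m.toList) := by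
  simp only [PySem.Str.replace, String.toList_ofList]
  rw [show ("~A" : String).toList = ['~', 'A'] from rfl,
      show ("~B" : String).toList = ['~', 'B'] from rfl,
      show ("~C" : String).toList = ['~', 'C'] from rfl,
      show ("~D" : String).toList = ['~', 'D'] from rfl,
      show ("A" : String).toList = ['A'] from rfl,
      show ("B" : String).toList = ['B'] from rfl,
      show ("C" : String).toList = ['C'] from rfl,
      show ("D" : String).toList = ['D'] from rfl,
      show ("(" : String).toList = ['('] from rfl,
      show (")" : String).toList = [')'] from rfl,
      show ("&" : String).toList = ['&'] from rfl,
      show ("|" : String).toList = ['|'] from rfl,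
      show ("+" : String).toList = ['+'] from rfl,
      show ("*" : String).toList = ['*'] from rfl,
      show (" " : String).toList = [' '] from rfl,
      show ("0" : String).toList = ['0'] from rfl,
      show ("1" : String).toList = ['1'] from rfl,
      show ("" : String).toList = [] from rfl]
  simp only [replace_eq_rep]
  rw [show ∀ cs, rep ' ' [] [] (rep '*' [] [] (rep '+' [] [] (rep '|' [] [] (rep '&' [] []
    (rep ')' [] [] (rep '(' [] [] (rep 'D' [] ['1'] (rep 'C' [] ['1']
    (rep 'B' [] ['1'] (rep 'A' [] ['1'] (rep '~' ['D'] ['0'] (rep '~' ['C'] ['0']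
    (rep '~' ['B'] ['0'] (rep '~' ['A'] ['0'] cs)))))))))))))) = chainR cs from fun _ => rfl]
  rw [chain_eq_scan]

-- ===== VERDICT (by name: the statement is the Claim_ definition above) =====
theorem convert_minterms_to_binary_spec : Claim_equal_convert_minterms_to_binary := by
  intro minterms _
  unfold Spec_convert_minterms_to_binary convert_minterms_to_binary convert_minterms_to_binary_alt
  rw [PySem.List.foldl_append_singleton_eq_map]
  exact List.map_congr_left (fun m _ => per_string m)
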